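-- pv_equiv track=rewrite | github.com/AhmedMorsy95/compiler | SyntaxAnalyzer/Grammar.py | find_prefix_suffixes
-- ===== SOURCE A (Python) =====
-- def find_prefix_suffixes(rules, prefixes):
--     prefix_suffix = dict()
--     for rule in rules:
--         for prefix in sorted(list(prefixes), key=lambda x: len(x), reverse=True):
--             if rule[0] == prefix:
--                 if prefix in prefix_suffix:
--                     prefix_suffix[prefix].add(tuple(rule[1:]))
--                 else:
--                     prefix_suffix[prefix] = set([tuple(rule[1:])])
--     return prefix_suffix
-- ===== SOURCE B (Python) =====
-- def find_prefix_suffixes(rules, prefixes):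
--     if not prefixes:
--         return {}
--     index = {}
--     for rule in rules:
--         index.setdefault(rule[0], set()).add(tuple(rule[1:]))
--     wanted = set(prefixes)
--     return {head: group for head, group in index.items() if head in wanted}
-- ===== Notes on version B (the rewrite author's own statement) =====
-- stated objective: faster
-- what changed: B builds one head-to-suffix-set index over all rules in a single pass and then filters the index entries by the prefix set, instead of A's re-sorting the prefix list and scanning it for every rule.
import Mathlib
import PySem

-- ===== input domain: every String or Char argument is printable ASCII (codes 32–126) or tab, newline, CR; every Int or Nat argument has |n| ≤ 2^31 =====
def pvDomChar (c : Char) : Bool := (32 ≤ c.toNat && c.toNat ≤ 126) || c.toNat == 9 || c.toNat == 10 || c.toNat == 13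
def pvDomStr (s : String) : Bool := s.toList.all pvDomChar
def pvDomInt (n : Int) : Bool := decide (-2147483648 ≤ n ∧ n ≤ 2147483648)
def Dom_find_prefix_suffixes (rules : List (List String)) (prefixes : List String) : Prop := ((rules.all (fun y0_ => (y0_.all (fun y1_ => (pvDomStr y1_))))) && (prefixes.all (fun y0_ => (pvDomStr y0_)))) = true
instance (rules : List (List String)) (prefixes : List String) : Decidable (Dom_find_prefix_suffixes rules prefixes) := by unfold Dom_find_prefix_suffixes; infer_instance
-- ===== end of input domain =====

-- B groups all suffixes by head in one indexing pass and filters by the prefix set afterwards,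
-- removing A's per-rule sort-and-scan of the prefix list (objective: faster, measured).

-- ===== PORT A =====
def find_prefix_suffixes (rules : List (List String)) (prefixes : List String) : List (String × List (List String)) :=
  (rules.foldl (fun d rule =>
      (PySem.List.sorted prefixes (fun x => PySem.Str.len x) true).foldl (fun d pre =>
        match PySem.List.pyGet? rule 0 with
        | none => d   -- Python raises IndexError here; excluded by Pre_
        | some h =>
          if h == pre then
            if d.contains pre then
              d.modify pre PySem.Set.empty (fun s => PySem.Set.add s (PySem.List.slice rule (some 1) none))
            else
              d.insert pre (PySem.Set.ofList [PySem.List.slice rule (some 1) none])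
          else d) d)
    PySem.Dict.empty).items

-- ===== PORT B =====
def find_prefix_suffixes_alt (rules : List (List String)) (prefixes : List String) : List (String × List (List String)) :=
  if prefixes = [] then []
  else
    let index := rules.foldl (fun d rule =>
        match PySem.List.pyGet? rule 0 with
        | none => d   -- Python raises IndexError here; excluded by Pre_
        | some h =>
          (d.setdefault h PySem.Set.empty).modify h PySem.Set.empty
            (fun s => PySem.Set.add s (PySem.List.slice rule (some 1) none)))
      PySem.Dict.empty
    let wanted := PySem.Set.ofList prefixes
    (index.items.foldl (fun d p => if wanted.contains p.1 then d.insert p.1 p.2 else d)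
      PySem.Dict.empty).items

-- ===== PRECONDITION & SPEC =====
-- Pre_ excludes exactly the inputs where Python A raises IndexError (an empty rule reached
-- while `prefixes` is nonempty); B's Python raises there too.
def Pre_find_prefix_suffixes (rules : List (List String)) (prefixes : List String) : Prop :=
  prefixes = [] ∨ [] ∉ rules
instance (rules : List (List String)) (prefixes : List String) : Decidable (Pre_find_prefix_suffixes rules prefixes) := by unfold Pre_find_prefix_suffixes; infer_instance

def pvWitness_find_prefix_suffixes : List (List String) × List String :=
  ([["A", "b"], ["A"], ["c", "d"], ["A", "b"]], ["A", "c"])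

def Spec_find_prefix_suffixes (rules : List (List String)) (prefixes : List String) (out : List (String × List (List String))) : Prop := out = find_prefix_suffixes_alt rules prefixes
instance (rules : List (List String)) (prefixes : List String) (out : List (String × List (List String))) : Decidable (Spec_find_prefix_suffixes rules prefixes out) := by unfold Spec_find_prefix_suffixes; infer_instance

-- ===== CLAIM (what is proved, stated in full; the proofs are below) =====
def Claim_equal_find_prefix_suffixes : Prop := ∀ (rules : List (List String)) (prefixes : List String), Dom_find_prefix_suffixes rules prefixes → Pre_find_prefix_suffixes rules prefixes → Spec_find_prefix_suffixes rules prefixes (find_prefix_suffixes rules prefixes)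

-- ===== LEMMAS AND PROOFS =====

theorem pvSet_add_idem {α : Type} [BEq α] [LawfulBEq α] (s : PySem.Set α) (x : α) :
    PySem.Set.add (PySem.Set.add s x) x = PySem.Set.add s x := by
  unfold PySem.Set.add
  by_cases hc : PySem.Set.contains s x = true
  · have hx : x ∈ s := by simpa [PySem.Set.contains] using hc
    simp [hx]
  · simp only [hc, if_neg, Bool.not_eq_true] at *
    simp_all [PySem.Set.contains]

def pvStep (d : PySem.Dict String (PySem.Set (List String))) (h : String) (t : List String) :
    PySem.Dict String (PySem.Set (List String)) :=
  d.insert h (PySem.Set.add (d.getD h PySem.Set.empty) t)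

theorem pvStep_idem (d : PySem.Dict String (PySem.Set (List String))) (h : String) (t : List String) :
    pvStep (pvStep d h t) h t = pvStep d h t := by
  unfold pvStep
  rw [PySem.Dict.getD_insert_self, PySem.Dict.insert_insert_self, pvSet_add_idem]

theorem pvA_branch (d : PySem.Dict String (PySem.Set (List String))) (h : String) (t : List String) :
    (if d.contains h then d.modify h PySem.Set.empty (fun s => PySem.Set.add s t)
     else d.insert h (PySem.Set.ofList [t])) = pvStep d h t := by
  unfold pvStep PySem.Dict.modify
  split
  · rfl
  · rename_i hc
    rw [PySem.Dict.getD_of_not_contains _ _ (by simpa using hc)]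
    rfl

theorem pvB_branch (d : PySem.Dict String (PySem.Set (List String))) (h : String) (t : List String) :
    (d.setdefault h PySem.Set.empty).modify h PySem.Set.empty (fun s => PySem.Set.add s t) = pvStep d h t := by
  by_cases hc : d.contains h = true
  · rw [PySem.Dict.setdefault_of_contains _ _ hc]
    rfl
  · rw [PySem.Dict.setdefault_of_not_contains _ _ (by simpa using hc)]
    unfold pvStep PySem.Dict.modify
    rw [PySem.Dict.getD_insert_self, PySem.Dict.insert_insert_self,
      PySem.Dict.getD_of_not_contains _ _ (by simpa using hc)]

theorem pvInner (h : String) (t : List String) (ps : List String)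
    (d : PySem.Dict String (PySem.Set (List String))) :
    ps.foldl (fun d pre => if h == pre then pvStep d h t else d) d
      = if h ∈ ps then pvStep d h t else d := by
  induction ps generalizing d with
  | nil => simp
  | cons p rest ih =>
    simp only [List.foldl_cons, ih, List.mem_cons]
    by_cases hp : h = p
    · subst hp
      simp [pvStep_idem]
    · simp [hp]

def pvFilt (P : String → Bool) (d : PySem.Dict String (PySem.Set (List String))) :
    PySem.Dict String (PySem.Set (List String)) :=
  PySem.Dict.mk (d.items.filter (fun p => P p.1))

theorem pvFilt_get? (P : String → Bool) (d : PySem.Dict String (PySem.Set (List String)))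
    (h : String) (hP : P h = true) : (pvFilt P d).get? h = d.get? h := by
  obtain ⟨l⟩ := d
  induction l with
  | nil => rfl
  | cons p rest ih =>
    obtain ⟨k, v⟩ := p
    by_cases hk : P k = true
    · simp only [pvFilt, List.filter_cons, hk, if_pos] at *
      rw [PySem.Dict.get?_mk_cons, PySem.Dict.get?_mk_cons]
      split
      · rfl
      · exact ih
    · have hne : (k == h) = false := by
        by_cases hkh : k = h
        · subst hkh; simp_all
        · simp [hkh]
      simp only [pvFilt, List.filter_cons, hk] at *
      rw [PySem.Dict.get?_mk_cons, hne]
      simpa using ih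

theorem pvFilt_contains (P : String → Bool) (d : PySem.Dict String (PySem.Set (List String)))
    (h : String) (hP : P h = true) : (pvFilt P d).contains h = d.contains h := by
  rw [PySem.Dict.contains_eq_isSome_get?, PySem.Dict.contains_eq_isSome_get?, pvFilt_get? P d h hP]

theorem pvFilt_contains_false (P : String → Bool) (d : PySem.Dict String (PySem.Set (List String)))
    (k : String) (hc : d.contains k = false) : (pvFilt P d).contains k = false := by
  simp only [PySem.Dict.contains, pvFilt] at *
  rw [List.any_eq_false] at *
  intro p hp
  exact hc p (List.mem_of_mem_filter hp)

theorem pvFilt_insert (P : String → Bool) (d : PySem.Dict String (PySem.Set (List String)))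
    (k : String) (v : PySem.Set (List String)) :
    pvFilt P (d.insert k v) = if P k then (pvFilt P d).insert k v else pvFilt P d := by
  by_cases hc : d.contains k = true
  · by_cases hP : P k = true
    · rw [if_pos hP]
      apply PySem.Dict.ext
      show List.filter (fun p => P p.1) (d.insert k v).items = ((pvFilt P d).insert k v).items
      rw [PySem.Dict.items_insert_of_contains _ _ hc,
        PySem.Dict.items_insert_of_contains _ _ (by rw [pvFilt_contains P d k hP]; exact hc),
        List.filter_map]
      show List.map _ (List.filter _ d.items) = _
      congr 1
      apply List.filter_congr
      intro p _
      simp only [Function.comp]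
      by_cases hk : p.1 = k
      · simp [hk]
      · simp [hk]
    · rw [if_neg (by simp [hP])]
      apply PySem.Dict.ext
      show List.filter (fun p => P p.1) (d.insert k v).items = List.filter (fun p => P p.1) d.items
      rw [PySem.Dict.items_insert_of_contains _ _ hc, List.filter_map]
      show List.map _ (List.filter _ d.items) = _
      have : List.filter ((fun p : String × PySem.Set (List String) => P p.1) ∘
          fun p => if (p.1 == k) = true then (k, v) else p) d.items
          = List.filter (fun p => P p.1) d.items := by
        apply List.filter_congr
        intro p _
        simp only [Function.comp]
        by_cases hk : p.1 = k
        · simp [hk, hP]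
        · simp [hk]
      rw [this]
      have hid : ∀ p ∈ List.filter (fun p : String × PySem.Set (List String) => P p.1) d.items,
          (if (p.1 == k) = true then (k, v) else p) = p := by
        intro p hp
        have hmem := List.of_mem_filter hp
        by_cases hk : p.1 = k
        · rw [hk] at hmem; simp_all
        · simp [hk]
      rw [List.map_congr_left hid, List.map_id']
  · by_cases hP : P k = true
    · rw [if_pos hP]
      apply PySem.Dict.ext
      show List.filter (fun p => P p.1) (d.insert k v).items = ((pvFilt P d).insert k v).items
      rw [PySem.Dict.items_insert_of_not_contains _ _ (by simpa using hc),
        PySem.Dict.items_insert_of_not_contains _ _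
          (pvFilt_contains_false P d k (by simpa using hc)),
        List.filter_append]
      simp [hP]
      rfl
    · rw [if_neg (by simp [hP])]
      apply PySem.Dict.ext
      show List.filter (fun p => P p.1) (d.insert k v).items = List.filter (fun p => P p.1) d.items
      rw [PySem.Dict.items_insert_of_not_contains _ _ (by simpa using hc), List.filter_append]
      simp [hP]

theorem pvFilt_step (P : String → Bool) (d : PySem.Dict String (PySem.Set (List String)))
    (h : String) (t : List String) :
    pvFilt P (pvStep d h t) = if P h then pvStep (pvFilt P d) h t else pvFilt P d := by
  unfold pvStep
  rw [pvFilt_insert]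
  by_cases hP : P h = true
  · rw [if_pos hP, if_pos hP, PySem.Dict.getD_eq_get?_getD, PySem.Dict.getD_eq_get?_getD,
      pvFilt_get? P d h hP]
  · rw [if_neg (by simp [hP]), if_neg (by simp [hP])]

theorem pvPyGet0 {α : Type} (x : α) (l : List α) :
    PySem.List.pyGet? (x :: l) 0 = some x := by
  simp [PySem.List.pyGet?, PySem.List.pyIdx?]

theorem pvFilt_fold (P : String → Bool) (rules : List (List String))
    (d : PySem.Dict String (PySem.Set (List String))) :
    pvFilt P (rules.foldl (fun d rule =>
        match PySem.List.pyGet? rule 0 with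
        | none => d
        | some h => pvStep d h (PySem.List.slice rule (some 1) none)) d)
      = rules.foldl (fun d rule =>
          match PySem.List.pyGet? rule 0 with
          | none => d
          | some h => if P h then pvStep d h (PySem.List.slice rule (some 1) none) else d)
        (pvFilt P d) := by
  induction rules generalizing d with
  | nil => rfl
  | cons r rest ih =>
    simp only [List.foldl_cons]
    rw [ih]
    congr 1
    cases hg : PySem.List.pyGet? r 0 with
    | none => rfl
    | some h =>
      show pvFilt P (pvStep d h _) = if P h then pvStep (pvFilt P d) h _ else pvFilt P d
      exact pvFilt_step P d h _

theorem pvP_iff (l : List String) (s : String) :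
    PySem.Set.contains (PySem.Set.ofList l) s = true ↔ s ∈ l := by
  simp [PySem.Set.contains, PySem.Set.mem_ofList]

-- the canonical indexing pass both programs perform
def pvIndex (rules : List (List String)) : PySem.Dict String (PySem.Set (List String)) :=
  rules.foldl (fun d rule =>
    match PySem.List.pyGet? rule 0 with
    | none => d
    | some h => pvStep d h (PySem.List.slice rule (some 1) none)) PySem.Dict.empty

theorem pvIndex_eq_insert_form (rules : List (List String)) (hr : [] ∉ rules) :
    pvIndex rules = rules.foldl (fun d rule =>
      d.insert rule.headI (PySem.Set.add (d.getD rule.headI PySem.Set.empty)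
        (PySem.List.slice rule (some 1) none))) PySem.Dict.empty := by
  apply PySem.List.foldl_congr_mem
  intro acc rule hmem
  cases rule with
  | nil => exact absurd hmem hr
  | cons x rs => rw [pvPyGet0]; rfl

theorem pvIndex_keys_nodup (rules : List (List String)) (hr : [] ∉ rules) :
    (pvIndex rules).keys.Nodup := by
  rw [pvIndex_eq_insert_form rules hr]
  exact PySem.Dict.nodup_keys_foldl_insert_key rules (fun rule => rule.headI) _ _
    PySem.Dict.nodup_keys_empty

theorem pvA_fold (rules : List (List String)) (prefixes : List String) (hr : [] ∉ rules) :
    find_prefix_suffixes rules prefixes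
      = (pvFilt (fun s => PySem.Set.contains (PySem.Set.ofList prefixes) s) (pvIndex rules)).items := by
  unfold find_prefix_suffixes pvIndex
  rw [pvFilt_fold]
  congr 1
  apply PySem.List.foldl_congr_mem
  intro acc rule hmem
  cases rule with
  | nil => exact absurd hmem hr
  | cons x rs =>
    rw [pvPyGet0]
    rw [PySem.List.foldl_congr_mem _ _
      (fun d pre => if x == pre then pvStep d x (PySem.List.slice (x :: rs) (some 1) none) else d) acc
      (by
        intro d pre _
        by_cases hxp : x = pre
        · subst hxp
          simp only [beq_self_eq_true, if_pos]
          exact pvA_branch d x _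
        · simp [hxp])]
    rw [pvInner]
    simp only [(PySem.List.sorted_perm prefixes (fun x => PySem.Str.len x) true).mem_iff]
    by_cases hx : x ∈ prefixes
    · rw [if_pos hx, if_pos (by rw [pvP_iff]; exact hx)]
    · rw [if_neg hx, if_neg (by rw [pvP_iff]; exact hx)]

theorem pvB_fold (rules : List (List String)) (prefixes : List String) (hne : prefixes ≠ [])
    (hr : [] ∉ rules) :
    find_prefix_suffixes_alt rules prefixes
      = (pvFilt (fun s => PySem.Set.contains (PySem.Set.ofList prefixes) s) (pvIndex rules)).items := by
  unfold find_prefix_suffixes_alt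
  rw [if_neg hne]
  show (((rules.foldl (fun d rule =>
      match PySem.List.pyGet? rule 0 with
      | none => d
      | some h => (d.setdefault h PySem.Set.empty).modify h PySem.Set.empty
          (fun s => PySem.Set.add s (PySem.List.slice rule (some 1) none))) PySem.Dict.empty).items.foldl
      (fun d p => if (PySem.Set.ofList prefixes).contains p.1 then d.insert p.1 p.2 else d)
      PySem.Dict.empty).items) = _
  have hidx : (rules.foldl (fun d rule =>
      match PySem.List.pyGet? rule 0 with
      | none => d
      | some h => (d.setdefault h PySem.Set.empty).modify h PySem.Set.empty
          (fun s => PySem.Set.add s (PySem.List.slice rule (some 1) none))) PySem.Dict.empty)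
      = pvIndex rules := by
    unfold pvIndex
    apply PySem.List.foldl_congr_mem
    intro acc rule _
    cases hg : PySem.List.pyGet? rule 0 with
    | none => rfl
    | some h => exact pvB_branch acc h _
  rw [hidx]
  have heq := PySem.List.foldl_if_eq_foldl_filter
    (fun p : String × PySem.Set (List String) => (PySem.Set.ofList prefixes).contains p.1)
    (fun (d : PySem.Dict String (PySem.Set (List String))) p => d.insert p.1 p.2)
    (pvIndex rules).items PySem.Dict.empty
  simp only [heq]
  have hnd : ((List.filter (fun p => (PySem.Set.ofList prefixes).contains p.1)
      (pvIndex rules).items).map (fun p : String × PySem.Set (List String) => p.1)).Nodup := by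
    have hk := pvIndex_keys_nodup rules hr
    simp only [PySem.Dict.keys] at hk
    exact ((List.filter_sublist).map (fun p : String × PySem.Set (List String) => p.1)).nodup hk
  have hfresh := PySem.Dict.items_foldl_insert_fresh
    (List.filter (fun p => (PySem.Set.ofList prefixes).contains p.1) (pvIndex rules).items)
    (fun p : String × PySem.Set (List String) => p.1) (fun p => p.2) PySem.Dict.empty
    (fun a _ => by rfl) hnd
  simp only [PySem.Dict.empty] at hfresh ⊢
  simp [pvFilt, PySem.Set.contains] at hfresh ⊢
  exact hfresh

-- ===== VERDICT (by name: the statement is the Claim_ definition above) =====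
theorem find_prefix_suffixes_spec : Claim_equal_find_prefix_suffixes := by
  intro rules prefixes _ hpre
  unfold Spec_find_prefix_suffixes
  by_cases hp : prefixes = []
  · subst hp
    simp [find_prefix_suffixes, find_prefix_suffixes_alt, PySem.List.sorted, PySem.Dict.empty]
  · have hr : [] ∉ rules := hpre.resolve_left hp
    rw [pvA_fold rules prefixes hr, pvB_fold rules prefixes hp hr]
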